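-- pv_equiv track=rewrite | github.com/issdandavis/SCBE-AETHERMOORE | scripts/gen_full_book_panels.py | extract_scenes
-- ===== SOURCE A (Python) =====
-- def extract_scenes(text):
--     """Extract key scenes from chapter text for panel creation."""
--     scenes = []
--     paragraphs = [p.strip() for p in text.split("\n\n") if p.strip() and not p.strip().startswith("#")]
--
--     # Find scene breaks (marked by * * * or ---)
--     current_scene = []
--     for para in paragraphs:
--         if para.strip() in ("* * *", "---", "***"):
--             if current_scene:
--                 scenes.append("\n\n".join(current_scene))
--                 current_scene = []
--         else:
--             current_scene.append(para)
--     if current_scene: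
--         scenes.append("\n\n".join(current_scene))
--
--     return scenes
-- ===== SOURCE B (Python) =====
-- MARKERS = ("* * *", "---", "***")
--
--
-- def extract_scenes(text):
--     """Extract key scenes from chapter text for panel creation."""
--     paras = [p.strip() for p in text.split("\n\n")
--              if p.strip() and not p.strip().startswith("#")]
--     scenes = []
--     i, n = 0, len(paras)
--     while i < n:
--         if paras[i] in MARKERS:
--             i += 1
--         else:
--             j = i + 1
--             while j < n and paras[j] not in MARKERS:
--                 j += 1
--             scenes.append("\n\n".join(paras[i:j]))
--             i = j
--     return scenes
-- ===== Notes on version B (the rewrite author's own statement) =====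
-- stated objective: alternative
-- what changed: Replaces the flush-on-marker accumulator (building current_scene and flushing it at each marker and at the end) with a two-pointer scan that skips markers and emits each maximal marker-free run of paragraphs directly as a joined slice.
import Mathlib
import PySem

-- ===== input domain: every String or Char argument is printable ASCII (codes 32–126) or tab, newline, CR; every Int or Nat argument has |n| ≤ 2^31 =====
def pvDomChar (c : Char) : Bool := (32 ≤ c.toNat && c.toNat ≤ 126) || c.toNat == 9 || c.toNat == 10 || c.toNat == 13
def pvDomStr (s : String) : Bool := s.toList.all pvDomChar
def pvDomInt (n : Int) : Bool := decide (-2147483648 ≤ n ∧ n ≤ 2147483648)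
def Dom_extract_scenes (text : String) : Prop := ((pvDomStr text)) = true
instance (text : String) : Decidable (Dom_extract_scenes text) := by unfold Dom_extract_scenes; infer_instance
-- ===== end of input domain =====

-- B replaces A's flush-on-marker accumulator with a scan that emits each maximal
-- marker-free run of paragraphs directly; same return value, proved equal on Dom.

-- ===== PORT A =====
-- stepA is the body of A's for-loop (flush current_scene on a marker, else accumulate)
def stepA (st : List String × List String) (para : String) : List String × List String :=
  if PySem.Str.strip para == "* * *" || PySem.Str.strip para == "---" || PySem.Str.strip para == "***" then
    if st.2.isEmpty then st else (st.1 ++ [PySem.Str.join "\n\n" st.2], ([] : List String))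
  else (st.1, st.2 ++ [para])

def extract_scenes (text : String) : List String :=
  let paragraphs := (((PySem.Str.split? text "\n\n").getD []).filter
      (fun p => !(PySem.Str.strip p == "") && !PySem.Str.startswith (PySem.Str.strip p) "#")).map
      (fun p => PySem.Str.strip p)
  let r := paragraphs.foldl stepA ([], [])
  if r.2.isEmpty then r.1 else r.1 ++ [PySem.Str.join "\n\n" r.2]

-- ===== PORT B =====
def isMarker (p : String) : Bool := p == "* * *" || p == "---" || p == "***"

-- outer while loop of Source B: skip a marker, or emit the maximal marker-free run
-- (the inner while computing j is the takeWhile/dropWhile split of the remainder)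
def scenesRun : List String → List String
  | [] => []
  | p :: ps =>
    if isMarker p then scenesRun ps
    else PySem.Str.join "\n\n" ((p :: ps).takeWhile (fun q => !isMarker q)) ::
         scenesRun ((p :: ps).dropWhile (fun q => !isMarker q))
termination_by l => l.length
decreasing_by
  · simp
  · simp only [List.dropWhile_cons]
    simp_all only [Bool.not_false, if_true, List.length_cons]
    exact Nat.lt_succ_of_le (List.length_dropWhile_le _ _)

def extract_scenes_alt (text : String) : List String :=
  let paras := (((PySem.Str.split? text "\n\n").getD []).filter
      (fun p => !(PySem.Str.strip p == "") && !PySem.Str.startswith (PySem.Str.strip p) "#")).map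
      (fun p => PySem.Str.strip p)
  scenesRun paras

-- ===== PRECONDITION & SPEC =====
def Spec_extract_scenes (text : String) (out : List String) : Prop := out = extract_scenes_alt text
instance (text : String) (out : List String) : Decidable (Spec_extract_scenes text out) := by unfold Spec_extract_scenes; infer_instance

-- ===== CLAIM (what is proved, stated in full; the proofs are below) =====
def Claim_equal_extract_scenes : Prop := ∀ (text : String), Dom_extract_scenes text → Spec_extract_scenes text (extract_scenes text)

-- ===== LEMMAS AND PROOFS =====

lemma dropWhile_idem {α : Type} (p : α → Bool) (l : List α) :
    (l.dropWhile p).dropWhile p = l.dropWhile p := by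
  induction l with
  | nil => simp
  | cons a t ih => by_cases h : p a <;> simp [h, ih]

lemma dropWhile_eq_self_of_prefix {α : Type} (p : α → Bool) {l l' : List α}
    (h : l.dropWhile p = l) (hpre : l' <+: l) : l'.dropWhile p = l' := by
  cases l' with
  | nil => simp
  | cons a t =>
    obtain ⟨r, hr⟩ := hpre
    subst hr
    by_cases ha : p a
    · exfalso
      have := congrArg List.length h
      simp [ha] at this
      have hle := List.length_dropWhile_le p (t ++ r)
      have hd : (t ++ r).length = t.length + r.length := by simp
      omega
    · simp [ha]

lemma chars_strip_idem (l : List Char) :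
    PySem.Chars.strip (PySem.Chars.strip l) = PySem.Chars.strip l := by
  unfold PySem.Chars.strip PySem.Chars.lstrip PySem.Chars.rstrip
  set p := PySem.Chars.isspace with hp
  set t0 := List.dropWhile p (List.dropWhile p l).reverse with ht0
  have hpre : t0.reverse <+: List.dropWhile p l := by
    rw [← List.reverse_reverse (List.dropWhile p l)]
    exact List.reverse_prefix.mpr (List.dropWhile_suffix p)
  have h1 : t0.reverse.dropWhile p = t0.reverse :=
    dropWhile_eq_self_of_prefix p (dropWhile_idem p l) hpre
  rw [h1, List.reverse_reverse, dropWhile_idem]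

lemma strip_idem (s : String) :
    PySem.Str.strip (PySem.Str.strip s) = PySem.Str.strip s := by
  apply String.toList_inj.mp
  simp [chars_strip_idem]

lemma takeWhile_append_of_all {α : Type} (f : α → Bool) {a : List α} (b : List α)
    (h : ∀ x ∈ a, f x = true) : (a ++ b).takeWhile f = a ++ b.takeWhile f := by
  induction a with
  | nil => simp
  | cons x t ih =>
    have hx : f x = true := h x (by simp)
    simp only [List.cons_append, List.takeWhile_cons, hx, if_true]
    rw [ih (fun y hy => h y (by simp [hy]))]

lemma dropWhile_append_of_all {α : Type} (f : α → Bool) {a : List α} (b : List α)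
    (h : ∀ x ∈ a, f x = true) : (a ++ b).dropWhile f = b.dropWhile f := by
  induction a with
  | nil => simp
  | cons x t ih =>
    have hx : f x = true := h x (by simp)
    simp only [List.cons_append, List.dropWhile_cons, hx, if_true]
    exact ih (fun y hy => h y (by simp [hy]))

-- scenesRun on a list starting with a nonempty marker-free block
lemma scenesRun_block (cur rest : List String) (hne : cur ≠ [])
    (hc : ∀ x ∈ cur, isMarker x = false) :
    scenesRun (cur ++ rest) =
      PySem.Str.join "\n\n" (cur ++ rest.takeWhile (fun q => !isMarker q)) ::
      scenesRun (rest.dropWhile (fun q => !isMarker q)) := by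
  cases cur with
  | nil => exact absurd rfl hne
  | cons c cs =>
    have hall : ∀ x ∈ c :: cs, (fun q => !isMarker q) x = true := by
      intro x hx; simp [hc x hx]
    have hcm : isMarker c = false := hc c (by simp)
    rw [List.cons_append, scenesRun]
    simp only [hcm, Bool.false_eq_true, if_false]
    have htw : (c :: (cs ++ rest)).takeWhile (fun q => !isMarker q)
        = (c :: cs) ++ rest.takeWhile (fun q => !isMarker q) := by
      simpa using takeWhile_append_of_all (fun q => !isMarker q) rest hall
    have hdw : (c :: (cs ++ rest)).dropWhile (fun q => !isMarker q)
        = rest.dropWhile (fun q => !isMarker q) := by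
      simpa using dropWhile_append_of_all (fun q => !isMarker q) rest hall
    rw [htw, hdw]

lemma scenesRun_all (cur : List String) (hc : ∀ x ∈ cur, isMarker x = false) :
    scenesRun cur = if cur.isEmpty then [] else [PySem.Str.join "\n\n" cur] := by
  cases cur with
  | nil => simp [scenesRun]
  | cons c cs =>
    have h := scenesRun_block (c :: cs) [] (by simp) hc
    simp only [List.append_nil, List.takeWhile_nil, List.dropWhile_nil] at h
    rw [h, scenesRun]
    simp

lemma loopA_eq (paras : List String) : ∀ (scenes cur : List String),
    (∀ x ∈ paras, PySem.Str.strip x = x) →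
    (∀ x ∈ cur, isMarker x = false) →
    (let r := paras.foldl stepA (scenes, cur)
     if r.2.isEmpty then r.1 else r.1 ++ [PySem.Str.join "\n\n" r.2])
      = scenes ++ scenesRun (cur ++ paras) := by
  induction paras with
  | nil =>
    intro scenes cur _ hc
    simp only [List.foldl_nil, List.append_nil]
    rw [scenesRun_all cur hc]
    cases cur <;> simp
  | cons p ps ih =>
    intro scenes cur hp hc
    have hps : PySem.Str.strip p = p := hp p (by simp)
    have hp' : ∀ x ∈ ps, PySem.Str.strip x = x := fun x hx => hp x (by simp [hx])
    simp only [List.foldl_cons]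
    by_cases hm : isMarker p
    · have hstep : stepA (scenes, cur) p =
          (if cur.isEmpty then scenes else scenes ++ [PySem.Str.join "\n\n" cur], ([] : List String)) := by
        unfold stepA
        unfold isMarker at hm
        rw [hps, if_pos hm]
        cases cur <;> simp
      rw [hstep]
      rw [ih _ [] hp' (by simp)]
      cases cur with
      | nil =>
        simp only [List.isEmpty_nil, if_true, List.nil_append]
        rw [scenesRun, if_pos hm]
      | cons c cs =>
        rw [scenesRun_block (c :: cs) (p :: ps) (by simp) hc]
        simp only [List.isEmpty_cons, if_neg (by simp : ¬(false = true))]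
        have : (p :: ps).takeWhile (fun q => !isMarker q) = [] := by
          simp [hm]
        rw [this, List.append_nil]
        have hd : (p :: ps).dropWhile (fun q => !isMarker q) = p :: ps := by
          simp [hm]
        rw [hd, scenesRun, if_pos hm]
        simp
    · have hstep : stepA (scenes, cur) p = (scenes, cur ++ [p]) := by
        unfold stepA
        unfold isMarker at hm
        rw [hps, if_neg (by simpa using hm)]
      rw [hstep]
      have hc' : ∀ x ∈ cur ++ [p], isMarker x = false := by
        intro x hx
        rcases List.mem_append.mp hx with h | h
        · exact hc x h
        · simp at h; subst h; simpa using hm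
      rw [ih _ (cur ++ [p]) hp' hc']
      rw [List.append_assoc]
      rfl

-- ===== VERDICT (by name: the statement is the Claim_ definition above) =====
theorem extract_scenes_spec : Claim_equal_extract_scenes := by
  intro text _
  unfold Spec_extract_scenes extract_scenes extract_scenes_alt
  have hstrip : ∀ x ∈ (((PySem.Str.split? text "\n\n").getD []).filter
      (fun p => !(PySem.Str.strip p == "") && !PySem.Str.startswith (PySem.Str.strip p) "#")).map
      (fun p => PySem.Str.strip p), PySem.Str.strip x = x := by
    intro x hx
    obtain ⟨y, _, rfl⟩ := List.mem_map.mp hx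
    exact strip_idem y
  have h := loopA_eq _ [] [] hstrip (by simp)
  simp only [List.nil_append] at h
  exact h
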